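-- pv_equiv track=rewrite | github.com/domysh/high-school-projects | Python/CodiceFiscaleGenerator/GeneratorFiscalCode.py | CalculateName
-- ===== SOURCE A (Python) =====
-- def IsAVocale(lett):
-- 	lett = lett.upper()
-- 	return (lett == 'A' or lett == 'E' or lett == 'I' or lett=='O' or lett=='U')
--
-- def ReturnSeparateLetters(text):
-- 	resV = resC = ""
-- 	for let in text:
-- 		if IsAVocale(let):
-- 			resV+=let
-- 		else:
-- 			resC+=let
-- 	return [resV,resC]
--
-- def CalculateName(name):
-- 	res = ""
-- 	voc,cons = ReturnSeparateLetters(name)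
-- 	if len(name)<3:
-- 		res = cons+voc
-- 		for i in range(1,4-len(name)):
-- 			res+="X"
-- 	elif len(cons)<3:
-- 		res = cons
-- 		for let in voc:
-- 			res+=let
-- 			if len(res) == 3:
-- 				break
-- 	elif len(cons)==3:
-- 		res = cons
-- 	else:
-- 		res+=cons[0]+cons[2]+cons[3]
-- 	return res
-- ===== SOURCE B (Python) =====
-- def CalculateName(name):
--     # Stable sort puts consonants (key False) before vowels (key True), each in original order.
--     order = sorted(name, key=lambda c: c.upper() in "AEIOU")
--     ncons = sum(c.upper() not in "AEIOU" for c in name)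
--     idx = (0, 2, 3) if ncons > 3 else (0, 1, 2)
--     return "".join(order[i] for i in idx if i < len(order)).ljust(3, "X")
-- ===== Notes on version B (the rewrite author's own statement) =====
-- stated objective: alternative
-- what changed: B replaces A's vowel/consonant partition pass, two inner character loops and four-way branch on name length by a stable sort keyed on vowel-ness (consonants before vowels), a single index pick ((0,2,3) or (0,1,2)) guarded by bounds, and ljust-padding with X.
import Mathlib
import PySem

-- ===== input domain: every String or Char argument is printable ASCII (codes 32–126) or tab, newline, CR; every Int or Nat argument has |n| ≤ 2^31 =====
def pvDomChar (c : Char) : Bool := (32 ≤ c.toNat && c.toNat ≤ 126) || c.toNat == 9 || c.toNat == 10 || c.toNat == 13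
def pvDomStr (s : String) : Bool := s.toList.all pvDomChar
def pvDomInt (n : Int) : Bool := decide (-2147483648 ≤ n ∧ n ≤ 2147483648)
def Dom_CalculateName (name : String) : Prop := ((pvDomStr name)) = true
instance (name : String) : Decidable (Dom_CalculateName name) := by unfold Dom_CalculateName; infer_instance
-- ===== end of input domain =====

-- B replaces A's vowel/consonant partition loops and four-way branch by one stable sort
-- (consonants before vowels), an index pick and ljust-padding; equivalence of the RETURN
-- value is proved (no side effects).

-- ===== PORT A =====
def pvIsAVocale (lett : Char) : Bool :=
  let lett := PySem.Chars.upperChar lett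
  (lett == 'A' || lett == 'E' || lett == 'I' || lett == 'O' || lett == 'U')

def pvReturnSeparateLetters (text : List Char) : List Char × List Char :=
  text.foldl (fun (r : List Char × List Char) c =>
    if pvIsAVocale c then (r.1 ++ [c], r.2) else (r.1, r.2 ++ [c])) ([], [])

-- A's 'for let in voc: res += let; if len(res) == 3: break'
def pvVocLoop (res : List Char) : List Char → List Char
  | [] => res
  | c :: rest =>
      let res' := res ++ [c]
      if res'.length == 3 then res' else pvVocLoop res' rest

def CalculateName (name : String) : String :=
  let l := name.toList
  let p := pvReturnSeparateLetters l
  let voc := p.1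
  let cons := p.2
  if l.length < 3 then
    String.ofList ((PySem.List.pyRange 1 (4 - (l.length : Int)) 1).foldl
      (fun r _ => r ++ ['X']) (cons ++ voc))
  else if cons.length < 3 then
    String.ofList (pvVocLoop cons voc)
  else if cons.length == 3 then
    String.ofList cons
  else
    String.ofList (([] : List Char) ++ [cons[0]!] ++ [cons[2]!] ++ [cons[3]!])

-- ===== PORT B =====
-- "c.upper() in 'AEIOU'" : single-char membership in "AEIOU"
def pvAltVowel (c : Char) : Bool := ['A', 'E', 'I', 'O', 'U'].contains (PySem.Chars.upperChar c)

def CalculateName_alt (name : String) : String :=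
  let l := name.toList
  -- sorted(name, key=lambda c: c.upper() in "AEIOU"): stable, consonants (False) first
  let order := PySem.List.sorted l pvAltVowel
  -- sum(c.upper() not in "AEIOU" for c in name)
  let ncons : Int := l.foldl (fun acc c => acc + (if !(pvAltVowel c) then 1 else 0)) 0
  let idx : List Nat := if ncons > 3 then [0, 2, 3] else [0, 1, 2]
  -- "".join(order[i] for i in idx if i < len(order))
  let picked := (idx.filter (fun i => decide (i < order.length))).map (fun i => order[i]!)
  -- .ljust(3, "X"): pad on the right with 'X' up to length 3 (exact: picked never exceeds 3)
  String.ofList (picked ++ List.replicate (3 - picked.length) 'X')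

-- ===== PRECONDITION & SPEC =====
def Spec_CalculateName (name : String) (out : String) : Prop := out = CalculateName_alt name
instance (name : String) (out : String) : Decidable (Spec_CalculateName name out) := by unfold Spec_CalculateName; infer_instance

-- ===== CLAIM (what is proved, stated in full; the proofs are below) =====
def Claim_equal_CalculateName : Prop := ∀ (name : String), Dom_CalculateName name → Spec_CalculateName name (CalculateName name)

-- ===== LEMMAS AND PROOFS =====

theorem pvAltVowel_eq : pvAltVowel = pvIsAVocale := by
  funext c
  unfold pvAltVowel pvIsAVocale
  simp only [List.contains_eq_mem]
  generalize PySem.Chars.upperChar c = u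
  apply Bool.eq_iff_iff.mpr
  simp [List.mem_cons]
  tauto

theorem pvSep_go (l : List Char) (aV aC : List Char) :
    l.foldl (fun (r : List Char × List Char) c =>
      if pvIsAVocale c then (r.1 ++ [c], r.2) else (r.1, r.2 ++ [c])) (aV, aC)
    = (aV ++ l.filter pvIsAVocale, aC ++ l.filter (fun c => !(pvIsAVocale c))) := by
  induction l generalizing aV aC with
  | nil => simp
  | cons c rest ih =>
    by_cases h : pvIsAVocale c <;> simp [h, ih]

theorem pvSep_eq (l : List Char) :
    pvReturnSeparateLetters l = (l.filter pvIsAVocale, l.filter (fun c => !(pvIsAVocale c))) := by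
  simpa [pvReturnSeparateLetters] using pvSep_go l [] []

theorem pvLen_split (l : List Char) :
    (l.filter pvIsAVocale).length + (l.filter (fun c => !(pvIsAVocale c))).length = l.length := by
  induction l with
  | nil => simp
  | cons c rest ih => by_cases h : pvIsAVocale c <;> simp [h] <;> omega

theorem pvVocLoop_eq (voc res : List Char) (h1 : res.length < 3)
    (h2 : 3 ≤ res.length + voc.length) : pvVocLoop res voc = (res ++ voc).take 3 := by
  induction voc generalizing res with
  | nil => simp at h2; omega
  | cons c rest ih =>
    simp only [pvVocLoop]
    by_cases h3 : (res ++ [c]).length == 3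
    · simp only [h3, if_true]
      have h3' : (res ++ [c]).length = 3 := by simpa using h3
      have he : res ++ c :: rest = (res ++ [c]) ++ rest := by simp
      rw [he, List.take_append, h3', Nat.sub_self, List.take_zero, List.append_nil,
        List.take_of_length_le (by omega)]
    · simp only [h3, if_neg (by simp : ¬ (false = true))]
      have h3' : (res ++ [c]).length ≠ 3 := by simpa using h3
      have hlt : (res ++ [c]).length < 3 := by simp at h3' ⊢; omega
      have hge : 3 ≤ (res ++ [c]).length + rest.length := by simp at h2 ⊢; omega
      rw [ih _ hlt hge]
      simp

-- insertBy's two defining equations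
theorem pvInsertBy_nil {α : Type} (before : α → α → Bool) (x : α) :
    PySem.List.insertBy before x [] = [x] := rfl

theorem pvInsertBy_cons {α : Type} (before : α → α → Bool) (x y : α) (ys : List α) :
    PySem.List.insertBy before x (y :: ys) =
      if before x y then x :: y :: ys else y :: PySem.List.insertBy before x ys := rfl

-- inserting a key-false element into (all-false F ++ all-true T) puts it between them
theorem pvInsertBy_false (key : Char → Bool) (x : Char) (F T : List Char)
    (hx : key x = false) (hF : ∀ a ∈ F, key a = false) (hT : ∀ a ∈ T, key a = true) :
    PySem.List.insertBy (fun a b => decide (key a < key b)) x (F ++ T) = F ++ x :: T := by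
  induction F with
  | nil =>
    cases T with
    | nil => simp [pvInsertBy_nil]
    | cons t ts =>
      have ht : key t = true := hT t (by simp)
      simp [pvInsertBy_cons, hx, ht]
  | cons f F' ih =>
    have hf : key f = false := hF f (by simp)
    have : (decide (key x < key f)) = false := by simp [hx, hf]
    simp only [List.cons_append, pvInsertBy_cons, this, Bool.false_eq_true, if_neg,
      not_false_eq_true]
    rw [ih (fun a ha => hF a (by simp [ha]))]

-- the fold of insertBy keeps the state in the form (all-false ++ all-true)
theorem pvFoldIns (key : Char → Bool) (l F T : List Char)
    (hF : ∀ a ∈ F, key a = false) (hT : ∀ a ∈ T, key a = true) :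
    l.foldl (fun acc x => PySem.List.insertBy (fun a b => decide (key a < key b)) x acc) (F ++ T)
      = (F ++ l.filter (fun c => !(key c))) ++ (T ++ l.filter key) := by
  induction l generalizing F T with
  | nil => simp
  | cons x l' ih =>
    by_cases hx : key x = true
    · have h1 : PySem.List.insertBy (fun a b => decide (key a < key b)) x (F ++ T)
          = F ++ (T ++ [x]) := by
        rw [← List.append_assoc]
        exact PySem.List.insertBy_of_forall_not_before _ x (F ++ T)
          (fun y _ => by simp [hx])
      simp only [List.foldl_cons, h1]
      rw [ih F (T ++ [x]) hF (by intro a ha; rcases List.mem_append.mp ha with h | h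
                                 · exact hT a h
                                 · simp at h; simpa [h])]
      simp [hx]
    · have hx' : key x = false := by simpa using hx
      simp only [List.foldl_cons, pvInsertBy_false key x F T hx' hF hT]
      have : F ++ x :: T = (F ++ [x]) ++ T := by simp
      rw [this, ih (F ++ [x]) T (by intro a ha; rcases List.mem_append.mp ha with h | h
                                    · exact hF a h
                                    · simp at h; simpa [h]) hT]
      simp [hx']

-- a stable sort by a boolean key is exactly "false-keyed elements, then true-keyed ones"
theorem pvSorted_bool (key : Char → Bool) (l : List Char) :
    PySem.List.sorted l key = l.filter (fun c => !(key c)) ++ l.filter key := by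
  rw [PySem.List.sorted_eq_foldl_insertBy]
  simpa using pvFoldIns key l [] [] (by simp) (by simp)

-- counting loop = length of the filter
theorem pvCount_eq (key : Char → Bool) (l : List Char) (n : Int) :
    l.foldl (fun acc c => acc + (if !(key c) then 1 else 0)) n
      = n + ((l.filter (fun c => !(key c))).length : Int) := by
  induction l generalizing n with
  | nil => simp
  | cons c l' ih =>
    rw [List.foldl_cons, ih]
    cases hk : key c <;> simp [hk] <;> push_cast <;> ring

-- the index pick for idx = [0,1,2] is take 3
theorem pvPick012 (L : List Char) :
    (([0, 1, 2] : List Nat).filter (fun i => decide (i < L.length))).map (fun i => L[i]!)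
      = L.take 3 := by
  match L with
  | [] => rfl
  | [a] => rfl
  | [a, b] => rfl
  | a :: b :: c :: r => simp [List.filter]

-- the index pick for idx = [0,2,3] on a list of length ≥ 4
theorem pvPick023 (L : List Char) (h : 4 ≤ L.length) :
    (([0, 2, 3] : List Nat).filter (fun i => decide (i < L.length))).map (fun i => L[i]!)
      = [L[0]!, L[2]!, L[3]!] := by
  match L, h with
  | a :: b :: c :: d :: r, _ => simp [List.filter]

theorem pvGetBang_append_left (C V : List Char) (i : Nat) (h : i < C.length) :
    (C ++ V)[i]! = C[i]! := by
  rw [getElem!_pos (C ++ V) i (by simp; omega), getElem!_pos C i h]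
  exact List.getElem_append_left h

theorem CalculateName_eq (name : String) : CalculateName name = CalculateName_alt name := by
  simp only [CalculateName, CalculateName_alt, pvSep_eq, pvSorted_bool, pvCount_eq,
    pvAltVowel_eq]
  set l := name.toList with hl
  set V := l.filter pvIsAVocale with hV
  set C := l.filter (fun c => !(pvIsAVocale c)) with hC
  have hsum : V.length + C.length = l.length := pvLen_split l
  simp only [Int.zero_add]
  by_cases h4 : ((C.length : Int) > 3)
  · -- ≥ 4 consonants: both pick consonants 1, 3, 4
    have h4' : 4 ≤ C.length := by omega
    have hlen : ¬ l.length < 3 := by omega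
    have hc1 : ¬ C.length < 3 := by omega
    have hc2 : (C.length == 3) = false := by simp; omega
    rw [if_pos h4, if_neg hlen, if_neg hc1, hc2, if_neg (by simp : ¬ (false = true)),
      pvPick023 (C ++ V) (by simp; omega)]
    have e0 := pvGetBang_append_left C V 0 (by omega)
    have e2 := pvGetBang_append_left C V 2 (by omega)
    have e3 := pvGetBang_append_left C V 3 (by omega)
    simp [e0, e2, e3]
  · rw [if_neg h4, pvPick012 (C ++ V)]
    have h4' : C.length ≤ 3 := by omega
    by_cases h1 : l.length < 3
    · -- short name: everything, padded with 'X' to length 3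
      rw [if_pos h1]
      have hcv : (C ++ V).length = l.length := by simp; omega
      have htk : (C ++ V).take 3 = C ++ V := List.take_of_length_le (by omega)
      rw [htk]
      congr 1
      have h0 : l.length = 0 ∨ l.length = 1 ∨ l.length = 2 := by omega
      rcases h0 with h0 | h0 | h0 <;> rw [h0] <;> rw [show ((C ++ V).length = l.length) from hcv] <;> rw [h0]
      · have hnil : C ++ V = [] := List.eq_nil_of_length_eq_zero (by omega)
        rw [hnil]; decide
      · obtain ⟨a, ha⟩ := List.length_eq_one_iff.mp (show (C ++ V).length = 1 by omega)
        rw [ha]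
        have hr : PySem.List.pyRange 1 (4 - ((1 : Nat) : Int)) 1 = [1, 2] := by decide
        rw [hr]; simp [List.foldl, List.replicate]
      · obtain ⟨a, b, hab⟩ := List.length_eq_two.mp (show (C ++ V).length = 2 by omega)
        rw [hab]
        have hr : PySem.List.pyRange 1 (4 - ((2 : Nat) : Int)) 1 = [1] := by decide
        rw [hr]; simp [List.foldl, List.replicate]
    · rw [if_neg h1]
      have hlen3 : ((C ++ V).take 3).length = 3 := by simp; omega
      have hpad : (3 - ((C ++ V).take 3).length) = 0 := by omega
      rw [hpad]
      simp only [List.replicate_zero, List.append_nil]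
      by_cases h2 : C.length < 3
      · rw [if_pos h2]
        congr 1
        exact pvVocLoop_eq V C h2 (by omega)
      · have h3 : C.length = 3 := by omega
        have hb : (C.length == 3) = true := by simp [h3]
        rw [if_neg h2, hb, if_pos rfl]
        congr 1
        rw [List.take_append]
        rw [List.take_of_length_le (by omega), h3, Nat.sub_self, List.take_zero,
          List.append_nil]

-- ===== VERDICT (by name: the statement is the Claim_ definition above) =====
theorem CalculateName_spec : Claim_equal_CalculateName := by
  intro name _
  unfold Spec_CalculateName
  exact CalculateName_eq name
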